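/- GENERATED by c/gen_decode.py: decode facts of the image, one per distinct instruction byte string. -/
import UserX.DecodeImage

#decode_all Toyh.Dec
  "488905e4c80300"  -- mov QWORD PTR [rip+0x3c8e4],rax
  "bf40161400"  -- mov edi,0x141640
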